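-- pv_equiv track=rewrite | github.com/nuckee/taxinfo2hwp | te.py | number_to_korean_amount
-- ===== SOURCE A (Python) =====
-- def number_to_korean_amount(number):
--     """
--     주어진 숫자를 한글로 변환하여 금액 표현과 함께 리턴하는 함수입니다.
--
--     Parameters:
--         number (int): 변환할 숫자
--
--     Returns:
--         str: 한글로 변환된 금액 표현 (예: "128,600원(금일십이만팔천육백원정)")
--     """
--     korean_numbers = ["일", "이", "삼", "사", "오", "육", "칠", "팔", "구"]
--     korean_units = ["", "십", "백", "천"]
--     korean_big_units = ["", "만", "억", "조", "경", "해", "경", "조", "억", "만"]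
--
--     number_str = str(number)
--     result = []
--     length = len(number_str)
--
--     for i, digit in enumerate(number_str):
--         num = int(digit)
--         unit_index = (length - 1 - i) % 4
--         if num != 0:
--             if i > 0 and unit_index == 0 and number_str[i - 1] == '1':
--                 result.append(korean_numbers[0])
--             else:
--                 result.append(korean_numbers[num - 1])
--             result.append(korean_units[unit_index])
--         if unit_index == 0 and i < length - 1:
--             result.append(korean_big_units[(length - 1 - i) // 4])
--
--     return "".join(result) + "원(금" + "".join(result) + "정)"
-- ===== SOURCE B (Python) =====
-- def number_to_korean_amount(number):
--     """Recursive most-significant-group-first rendering: split off the leading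
--     group of up to four digits, render it with a local per-group loop, emit the
--     big unit for the digits that remain, and recurse on the rest."""
--     korean_numbers = ["일", "이", "삼", "사", "오", "육", "칠", "팔", "구"]
--     korean_units = ["", "십", "백", "천"]
--     korean_big_units = ["", "만", "억", "조", "경", "해", "경", "조", "억", "만"]
--
--     def render_group(g):
--         out = ""
--         for j in range(len(g)):
--             d = int(g[j])
--             if d != 0:
--                 u = len(g) - 1 - j
--                 if u == 0 and j > 0 and g[j - 1] == '1':
--                     out += korean_numbers[0]
--                 else:
--                     out += korean_numbers[d - 1]
--                 out += korean_units[u]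
--         return out
--
--     def go(s):
--         if len(s) <= 4:
--             return render_group(s)
--         h = (len(s) - 1) % 4 + 1
--         return (render_group(s[:h])
--                 + korean_big_units[(len(s) - h) // 4]
--                 + go(s[h:]))
--
--     body = go(str(number))
--     return body + "원(금" + body + "정)"
-- ===== Notes on version B (the rewrite author's own statement) =====
-- stated objective: alternative
-- what changed: B renders the amount recursively: it splits off the most-significant group of up to four digits, renders each group with a local index loop that concatenates strings directly, emits one big unit per remaining block and recurses, replacing A's single flat enumerate loop over the whole digit string driven by global (length-1-i)%4 and //4 index arithmetic into an appended piece list.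
import Mathlib
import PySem

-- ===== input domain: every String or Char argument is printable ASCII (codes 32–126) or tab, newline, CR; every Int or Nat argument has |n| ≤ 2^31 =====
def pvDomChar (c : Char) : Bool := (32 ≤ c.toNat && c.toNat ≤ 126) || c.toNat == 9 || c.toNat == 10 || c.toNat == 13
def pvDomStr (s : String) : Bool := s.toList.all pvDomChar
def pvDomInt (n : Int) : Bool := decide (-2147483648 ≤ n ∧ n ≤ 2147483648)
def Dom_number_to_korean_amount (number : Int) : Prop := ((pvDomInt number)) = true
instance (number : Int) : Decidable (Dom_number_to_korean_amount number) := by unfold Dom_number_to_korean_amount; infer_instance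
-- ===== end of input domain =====

-- B renders the amount recursively, splitting off the most-significant four-digit group and
-- concatenating per-group strings, instead of A's flat indexed scan (objective: alternative).

-- ===== PORT A =====
def pvNumsA : List String := ["일", "이", "삼", "사", "오", "육", "칠", "팔", "구"]
def pvUnitsA : List String := ["", "십", "백", "천"]
def pvBigsA : List String := ["", "만", "억", "조", "경", "해", "경", "조", "억", "만"]

def number_to_korean_amount (number : Int) : String :=
  let numberStr := PySem.Int.toChars number
  let length : Int := PySem.List.len numberStr
  let result : List String :=
    (PySem.List.enumerate numberStr).foldl (fun result p =>
      let num := (PySem.Int.ofChars? [p.2]).getD 0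
      let unitIndex := PySem.Int.mod (length - 1 - p.1) 4
      let result :=
        if num ≠ 0 then
          (if p.1 > 0 ∧ unitIndex = 0 ∧ PySem.List.pyGetD numberStr (p.1 - 1) ' ' = '1' then
             result ++ [PySem.List.pyGetD pvNumsA 0 ""]
           else
             result ++ [PySem.List.pyGetD pvNumsA (num - 1) ""]) ++
          [PySem.List.pyGetD pvUnitsA unitIndex ""]
        else result
      if unitIndex = 0 ∧ p.1 < length - 1 then
        result ++ [PySem.List.pyGetD pvBigsA (PySem.Int.floordiv (length - 1 - p.1) 4) ""]
      else result) []
  PySem.Str.join "" result ++ "원(금" ++ PySem.Str.join "" result ++ "정)"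

-- ===== PORT B =====
def pvKNums : List String := ["일", "이", "삼", "사", "오", "육", "칠", "팔", "구"]
def pvKUnits : List String := ["", "십", "백", "천"]
def pvKBigs : List String := ["", "만", "억", "조", "경", "해", "경", "조", "억", "만"]

-- render_group: 'for j in range(len(g)): … out += …' building the string directly
def pvRenderGroup (g : List Char) : String :=
  (PySem.List.pyRange 0 (PySem.List.len g) 1).foldl (fun out j =>
    let d := (PySem.Int.ofChars? [PySem.List.pyGetD g j ' ']).getD 0
    if d ≠ 0 then
      let u := PySem.List.len g - 1 - j
      (if u = 0 ∧ j > 0 ∧ PySem.List.pyGetD g (j - 1) ' ' = '1' then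
         out ++ PySem.List.pyGetD pvKNums 0 ""
       else out ++ PySem.List.pyGetD pvKNums (d - 1) "") ++
      PySem.List.pyGetD pvKUnits u ""
    else out) ""

-- go: peel off the leading group s[:h], emit the big unit for the remaining digits, recurse on s[h:]
def pvGo (s : List Char) : String :=
  if PySem.List.len s ≤ 4 then pvRenderGroup s
  else
    let h := PySem.Int.mod (PySem.List.len s - 1) 4 + 1
    pvRenderGroup (PySem.List.slice s none (some h)) ++
      PySem.List.pyGetD pvKBigs (PySem.Int.floordiv (PySem.List.len s - h) 4) "" ++
      pvGo (PySem.List.slice s (some h) none)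
termination_by s.length
decreasing_by
  have h0 : (0:Int) ≤ PySem.Int.mod (PySem.List.len s - 1) 4 :=
    PySem.Int.mod_nonneg _ (by norm_num)
  have hge : (0:Int) ≤ PySem.Int.mod (PySem.List.len s - 1) 4 + 1 := by omega
  rw [PySem.List.slice_from s hge]
  simp only [PySem.List.len_eq] at *
  rw [List.length_drop]
  omega

def number_to_korean_amount_alt (number : Int) : String :=
  let body := pvGo (PySem.Int.toChars number)
  body ++ "원(금" ++ body ++ "정)"

-- ===== PRECONDITION & SPEC =====
-- Pre_ excludes negative numbers: there str(number) starts with '-' and int('-') raises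
-- ValueError in A (and in B alike); A returns normally on every number ≥ 0 in Dom.
def Pre_number_to_korean_amount (number : Int) : Prop := 0 ≤ number
instance (number : Int) : Decidable (Pre_number_to_korean_amount number) := by
  unfold Pre_number_to_korean_amount; infer_instance
def pvWitness_number_to_korean_amount : Int := 128600

def Spec_number_to_korean_amount (number : Int) (out : String) : Prop :=
  out = number_to_korean_amount_alt number
instance (number : Int) (out : String) : Decidable (Spec_number_to_korean_amount number out) := by
  unfold Spec_number_to_korean_amount; infer_instance

-- ===== CLAIM (what is proved, stated in full; the proofs are below) =====
def Claim_equal_number_to_korean_amount : Prop :=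
  ∀ (number : Int), Dom_number_to_korean_amount number →
    Pre_number_to_korean_amount number →
    Spec_number_to_korean_amount number (number_to_korean_amount number)

-- ===== LEMMAS AND PROOFS =====

theorem pv_mod4 (a x : Int) (m : Nat) (he : a = x + 4 * (m : Int)) (h0 : 0 ≤ x) (h4 : x < 4) :
    PySem.Int.mod a 4 = x := by
  subst he
  rw [PySem.Int.mod_eq_emod_of_pos (by norm_num)]
  omega

theorem pv_div4 (a : Int) (m : Nat) (he : a = 4 * (m : Int)) :
    PySem.Int.floordiv a 4 = (m : Int) := by
  subst he
  rw [PySem.Int.floordiv_eq_ediv_of_pos (by norm_num)]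
  omega

theorem pv_getD_append_left (g t : List Char) (n : Nat) (h : n < g.length) (d : Char) :
    PySem.List.pyGetD (g ++ t) (n : Int) d = PySem.List.pyGetD g (n : Int) d := by
  rw [PySem.List.pyGetD_natCast, PySem.List.pyGetD_natCast,
    List.getD_eq_getElem?_getD, List.getD_eq_getElem?_getD, List.getElem?_append_left h]

theorem pv_getD_append_right (g t : List Char) (n : Nat) (d : Char) :
    PySem.List.pyGetD (g ++ t) ((g.length + n : Nat) : Int) d = PySem.List.pyGetD t (n : Int) d := by
  rw [PySem.List.pyGetD_natCast, PySem.List.pyGetD_natCast,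
    List.getD_eq_getElem?_getD, List.getD_eq_getElem?_getD,
    List.getElem?_append_right (by omega)]
  simp

theorem pv_flatten_len (rest : List (List Char)) (h : ∀ g ∈ rest, g.length = 4) :
    rest.flatten.length = 4 * rest.length := by
  induction rest with
  | nil => simp
  | cons g r ih =>
      simp only [List.flatten_cons, List.length_append, List.length_cons]
      rw [h g (by simp), ih (fun x hx => h x (by simp [hx]))]
      ring

-- per-digit piece of A's flat scan
def pvFFlat (s : List Char) (p : Int × Char) : List String :=
  let num := (PySem.Int.ofChars? [p.2]).getD 0
  let L : Int := PySem.List.len s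
  let ui := PySem.Int.mod (L - 1 - p.1) 4
  (if num ≠ 0 then
     (if p.1 > 0 ∧ ui = 0 ∧ PySem.List.pyGetD s (p.1 - 1) ' ' = '1' then
        [PySem.List.pyGetD pvNumsA 0 ""]
      else [PySem.List.pyGetD pvNumsA (num - 1) ""]) ++ [PySem.List.pyGetD pvUnitsA ui ""]
   else [])
  ++ (if ui = 0 ∧ p.1 < L - 1 then
        [PySem.List.pyGetD pvBigsA (PySem.Int.floordiv (L - 1 - p.1) 4) ""]
      else [])

-- per-digit piece of B's group-local renderer
def pvFInner (g : List Char) (p : Int × Char) : List String :=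
  let d := (PySem.Int.ofChars? [p.2]).getD 0
  let u := PySem.List.len g - 1 - p.1
  if d ≠ 0 then
    (if u = 0 ∧ p.1 > 0 ∧ PySem.List.pyGetD g (p.1 - 1) ' ' = '1' then
       [PySem.List.pyGetD pvKNums 0 ""]
     else [PySem.List.pyGetD pvKNums (d - 1) ""]) ++ [PySem.List.pyGetD pvKUnits u ""]
  else []

-- canonical rendering of a group list
def pvBodyGroups : List (List Char) → List String
  | [] => []
  | g :: rest =>
      ((PySem.List.enumerate g).flatMap (pvFInner g)
        ++ (if 0 < rest.length then [PySem.List.pyGetD pvKBigs (rest.length : Int) ""] else []))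
      ++ pvBodyGroups rest

-- well-formed group list: head 1..4 chars, all later groups exactly 4
def pvWFG : List (List Char) → Prop
  | [] => True
  | g :: rest => 1 ≤ g.length ∧ g.length ≤ 4 ∧ ∀ h ∈ rest, h.length = 4

theorem pv_core_ne (b : Nat) : ∀ (f n : Nat) (ds : List Char), ds ≠ [] ∨ 0 < f →
    Nat.toDigitsCore b f n ds ≠ [] := by
  intro f
  induction f with
  | zero =>
      intro n ds h
      simp only [Nat.toDigitsCore]
      rcases h with h | h
      · exact h
      · omega
  | succ f ih =>
      intro n ds h
      simp only [Nat.toDigitsCore]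
      split
      · simp
      · exact ih _ _ (Or.inl (by simp))

theorem pv_toChars_ne_nil (n : Int) : PySem.Int.toChars n ≠ [] := by
  unfold PySem.Int.toChars
  split
  · simp
  · exact pv_core_ne 10 _ _ _ (Or.inr (Nat.succ_pos _))

theorem pv_enumerate_shift {α : Type} (xs : List α) (a : Int) :
    PySem.List.enumerate xs a = (PySem.List.enumerate xs 0).map (fun p => (a + p.1, p.2)) := by
  induction xs generalizing a with
  | nil => simp [PySem.List.enumerate_nil]
  | cons x xs ih =>
      rw [PySem.List.enumerate_cons, PySem.List.enumerate_cons, ih (a+1)]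
      simp only [zero_add]
      rw [ih 1, List.map_cons, List.map_map]
      congr 1
      · simp
      · apply List.map_congr_left
        intro p _
        simp only [Function.comp_apply]
        simp
        ring

theorem pv_flatMap_last_extra (g : List Char) (f : Int × Char → List String) (e : List String)
    (a : Int) (hg : g ≠ []) :
    (PySem.List.enumerate g a).flatMap
        (fun p => f p ++ (if p.1 = a + (g.length : Int) - 1 then e else [])) =
      (PySem.List.enumerate g a).flatMap f ++ e := by
  induction g generalizing a with
  | nil => exact absurd rfl hg
  | cons x xs ih =>
    rcases xs with _ | ⟨y, ys⟩
    · simp only [PySem.List.enumerate_cons, PySem.List.enumerate_nil, List.flatMap_cons,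
        List.flatMap_nil, List.length_cons, List.length_nil]
      rw [if_pos (by push_cast; ring)]
      simp
    · have hlen : a + (((x :: y :: ys)).length : Int) - 1 = (a + 1) + (((y :: ys)).length : Int) - 1 := by
        push_cast [List.length_cons]
        ring
      rw [hlen, PySem.List.enumerate_cons, List.flatMap_cons, List.flatMap_cons]
      rw [if_neg (by simp only [List.length_cons]; omega)]
      rw [ih (a + 1) (by simp)]
      simp [List.append_assoc]

theorem pv_step (g t : List Char) (m : Nat) (h1 : 1 ≤ g.length) (h4 : g.length ≤ 4)
    (ht : t.length = 4 * m) :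
    (PySem.List.enumerate (g ++ t)).flatMap (pvFFlat (g ++ t)) =
      ((PySem.List.enumerate g).flatMap (pvFInner g)
        ++ (if 0 < m then [PySem.List.pyGetD pvKBigs (m : Int) ""] else []))
      ++ (PySem.List.enumerate t).flatMap (pvFFlat t) := by
  have hgne : g ≠ [] := List.ne_nil_of_length_pos (by omega)
  have hkc : ((g ++ t).length : Int) = (g.length : Int) + 4 * (m : Int) := by
    simp only [List.length_append, ht]
    push_cast
    ring
  rw [PySem.List.enumerate_append, List.flatMap_append]
  have hG : (PySem.List.enumerate g 0).flatMap (pvFFlat (g ++ t)) =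
      (PySem.List.enumerate g).flatMap (pvFInner g)
        ++ (if 0 < m then [PySem.List.pyGetD pvKBigs (m : Int) ""] else []) := by
    rw [← pv_flatMap_last_extra g (pvFInner g)
      (if 0 < m then [PySem.List.pyGetD pvKBigs (m : Int) ""] else []) 0 hgne]
    apply List.flatMap_congr
    intro p hp
    rw [PySem.List.mem_enumerate_iff] at hp
    obtain ⟨k, hk, rfl⟩ := hp
    have hki : ((k : Int)) < (g.length : Int) := by exact_mod_cast hk
    have hgl4 : ((g.length : Int)) ≤ 4 := by exact_mod_cast h4
    have hgl1 : (1 : Int) ≤ (g.length : Int) := by exact_mod_cast h1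
    simp only [pvFFlat, pvFInner, PySem.List.len_eq, zero_add]
    have hmod : PySem.Int.mod (((g ++ t).length : Int) - 1 - (k : Int)) 4
        = (g.length : Int) - 1 - (k : Int) :=
      pv_mod4 _ _ m (by rw [hkc]; ring) (by omega) (by omega)
    rw [hmod]
    rw [show pvNumsA = pvKNums from rfl, show pvUnitsA = pvKUnits from rfl]
    congr 1
    · -- digit part
      have hcond : ((k : Int) > 0 ∧ (g.length : Int) - 1 - (k : Int) = 0 ∧
            PySem.List.pyGetD (g ++ t) ((k : Int) - 1) ' ' = '1')
          ↔ ((g.length : Int) - 1 - (k : Int) = 0 ∧ (k : Int) > 0 ∧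
            PySem.List.pyGetD g ((k : Int) - 1) ' ' = '1') := by
        have hprev : 0 < k → PySem.List.pyGetD (g ++ t) ((k : Int) - 1) ' '
            = PySem.List.pyGetD g ((k : Int) - 1) ' ' := by
          intro hk0
          have h1' : ((k : Int) - 1) = (((k - 1 : Nat)) : Int) := by omega
          rw [h1', pv_getD_append_left g t (k - 1) (by omega) ' ']
        constructor
        · rintro ⟨a, b, c⟩
          refine ⟨b, a, ?_⟩
          rw [← hprev (by exact_mod_cast a)]
          exact c
        · rintro ⟨b, a, c⟩
          refine ⟨a, b, ?_⟩
          rw [hprev (by exact_mod_cast a)]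
          exact c
      split_ifs with h0 hA hB hB <;> first | rfl | (exact absurd (hcond.mp hA) hB) | (exact absurd (hcond.mpr hB) hA)
    · -- big-unit part
      by_cases hX : (g.length : Int) - 1 - (k : Int) = 0
      · have hkeq : (k : Int) = (g.length : Int) - 1 := by omega
        by_cases hm : 0 < m
        · rw [if_pos ⟨hX, by rw [hkc]; omega⟩, if_pos hkeq, if_pos hm]
          have hdiv : PySem.Int.floordiv (((g ++ t).length : Int) - 1 - (k : Int)) 4 = (m : Int) :=
            pv_div4 _ m (by rw [hkc]; omega)
          rw [hdiv, show pvBigsA = pvKBigs from rfl]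
        · rw [if_neg (by rw [hkc]; omega), if_pos hkeq, if_neg hm]
      · rw [if_neg (by tauto), if_neg (by omega)]
  have hT : (PySem.List.enumerate t (0 + (g.length : Int))).flatMap (pvFFlat (g ++ t)) =
      (PySem.List.enumerate t).flatMap (pvFFlat t) := by
    rw [pv_enumerate_shift t (0 + (g.length : Int)), List.flatMap_map]
    apply List.flatMap_congr
    intro p hp
    rw [PySem.List.mem_enumerate_iff] at hp
    obtain ⟨j, hj, rfl⟩ := hp
    have hji : ((j : Int)) < (t.length : Int) := by exact_mod_cast hj
    simp only [pvFFlat, PySem.List.len_eq, zero_add]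
    have hLy : ((g ++ t).length : Int) - 1 - ((g.length : Int) + (j : Int))
        = (t.length : Int) - 1 - (j : Int) := by
      simp [List.length_append]
      ring
    rw [hLy]
    congr 1
    · -- digit part
      have hj3 : PySem.Int.mod ((t.length : Int) - 1 - (j : Int)) 4 = 0 → 0 < j := by
        intro hy
        rw [PySem.Int.mod_eq_emod_of_pos (by norm_num)] at hy
        have htc : (t.length : Int) = 4 * (m : Int) := by exact_mod_cast ht
        omega
      have hprev : 0 < j → PySem.List.pyGetD (g ++ t) ((g.length : Int) + (j : Int) - 1) ' '
          = PySem.List.pyGetD t ((j : Int) - 1) ' ' := by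
        intro hj0
        have h1' : ((g.length : Int) + (j : Int) - 1) = (((g.length + (j - 1) : Nat)) : Int) := by
          omega
        have h2' : ((j : Int) - 1) = (((j - 1 : Nat)) : Int) := by omega
        rw [h1', h2', pv_getD_append_right g t (j - 1) ' ']
      have hcond : ((g.length : Int) + (j : Int) > 0 ∧
            PySem.Int.mod ((t.length : Int) - 1 - (j : Int)) 4 = 0 ∧
            PySem.List.pyGetD (g ++ t) ((g.length : Int) + (j : Int) - 1) ' ' = '1')
          ↔ ((j : Int) > 0 ∧ PySem.Int.mod ((t.length : Int) - 1 - (j : Int)) 4 = 0 ∧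
            PySem.List.pyGetD t ((j : Int) - 1) ' ' = '1') := by
        constructor
        · rintro ⟨a, b, c⟩
          have hj0 : 0 < j := hj3 b
          refine ⟨by exact_mod_cast hj0, b, ?_⟩
          rw [← hprev hj0]
          exact c
        · rintro ⟨a, b, c⟩
          have hj0 : 0 < j := hj3 b
          refine ⟨by positivity, b, ?_⟩
          rw [hprev hj0]
          exact c
      split_ifs with h0 hA hB hB <;> first | rfl | (exact absurd (hcond.mp hA) hB) | (exact absurd (hcond.mpr hB) hA)
    · -- big-unit part
      have hcond : (PySem.Int.mod ((t.length : Int) - 1 - (j : Int)) 4 = 0 ∧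
            (g.length : Int) + (j : Int) < ((g ++ t).length : Int) - 1)
          ↔ (PySem.Int.mod ((t.length : Int) - 1 - (j : Int)) 4 = 0 ∧
            (j : Int) < (t.length : Int) - 1) := by
        have : ((g ++ t).length : Int) = (g.length : Int) + (t.length : Int) := by
          simp [List.length_append]
        constructor
        · rintro ⟨a, b⟩; exact ⟨a, by omega⟩
        · rintro ⟨a, b⟩; exact ⟨a, by omega⟩
      split_ifs with hA hB hB <;> first | rfl | (exact absurd (hcond.mp hA) hB) | (exact absurd (hcond.mpr hB) hA)
  rw [hG, hT]

theorem pv_main (gs : List (List Char)) (hwf : pvWFG gs) :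
    (PySem.List.enumerate gs.flatten).flatMap (pvFFlat gs.flatten) = pvBodyGroups gs := by
  induction gs with
  | nil => simp [pvBodyGroups, PySem.List.enumerate_nil]
  | cons g rest ih =>
    obtain ⟨h1, h4, h3⟩ : 1 ≤ g.length ∧ g.length ≤ 4 ∧ ∀ h ∈ rest, h.length = 4 := hwf
    have ht : rest.flatten.length = 4 * rest.length := pv_flatten_len rest h3
    have hwr : pvWFG rest := by
      cases rest with
      | nil => trivial
      | cons h r =>
          refine ⟨?_, ?_, ?_⟩
          · rw [h3 h (by simp)]; omega
          · rw [h3 h (by simp)]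
          · intro x hx; exact h3 x (by simp [hx])
    rw [List.flatten_cons, pv_step g rest.flatten rest.length h1 h4 ht, ih hwr]
    simp [pvBodyGroups]

theorem pv_A_fold (s : List Char) :
    (PySem.List.enumerate s).foldl (fun result p =>
      let num := (PySem.Int.ofChars? [p.2]).getD 0
      let unitIndex := PySem.Int.mod (PySem.List.len s - 1 - p.1) 4
      let result :=
        if num ≠ 0 then
          (if p.1 > 0 ∧ unitIndex = 0 ∧ PySem.List.pyGetD s (p.1 - 1) ' ' = '1' then
             result ++ [PySem.List.pyGetD pvNumsA 0 ""]
           else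
             result ++ [PySem.List.pyGetD pvNumsA (num - 1) ""]) ++
          [PySem.List.pyGetD pvUnitsA unitIndex ""]
        else result
      if unitIndex = 0 ∧ p.1 < PySem.List.len s - 1 then
        result ++ [PySem.List.pyGetD pvBigsA (PySem.Int.floordiv (PySem.List.len s - 1 - p.1) 4) ""]
      else result) [] = (PySem.List.enumerate s).flatMap (pvFFlat s) := by
  have hfun : (fun (result : List String) (p : Int × Char) =>
      let num := (PySem.Int.ofChars? [p.2]).getD 0
      let unitIndex := PySem.Int.mod (PySem.List.len s - 1 - p.1) 4
      let result :=
        if num ≠ 0 then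
          (if p.1 > 0 ∧ unitIndex = 0 ∧ PySem.List.pyGetD s (p.1 - 1) ' ' = '1' then
             result ++ [PySem.List.pyGetD pvNumsA 0 ""]
           else
             result ++ [PySem.List.pyGetD pvNumsA (num - 1) ""]) ++
          [PySem.List.pyGetD pvUnitsA unitIndex ""]
        else result
      if unitIndex = 0 ∧ p.1 < PySem.List.len s - 1 then
        result ++ [PySem.List.pyGetD pvBigsA (PySem.Int.floordiv (PySem.List.len s - 1 - p.1) 4) ""]
      else result) = fun acc p => acc ++ pvFFlat s p := by
    funext acc p
    simp only [pvFFlat]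
    split_ifs <;> simp [List.append_assoc]
  rw [hfun, PySem.List.foldl_append_eq_flatMap]
  simp

-- ----- string-join helpers for the B side -----

theorem pv_join_nil : PySem.Str.join "" ([] : List String) = "" := by
  rfl

theorem pv_join_cons (x : String) (l : List String) :
    PySem.Str.join "" (x :: l) = x ++ PySem.Str.join "" l := by
  apply String.toList_inj.mp
  rw [String.toList_append, PySem.Str.toList_join, PySem.Str.toList_join]
  cases l with
  | nil => simp [PySem.Chars.join_singleton, PySem.Chars.join_nil]
  | cons y ys =>
      rw [List.map_cons, List.map_cons, PySem.Chars.join_cons_cons]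
      simp

theorem pv_join_append (l1 l2 : List String) :
    PySem.Str.join "" (l1 ++ l2) = PySem.Str.join "" l1 ++ PySem.Str.join "" l2 := by
  induction l1 with
  | nil => rw [List.nil_append, pv_join_nil, String.empty_append]
  | cons x xs ih =>
      rw [List.cons_append, pv_join_cons, pv_join_cons, ih, String.append_assoc]

theorem pv_join_flatMap (L : List Int) (F : Int → List String) :
    PySem.Str.join "" (L.map (fun j => PySem.Str.join "" (F j))) =
      PySem.Str.join "" (L.flatMap F) := by
  induction L with
  | nil => simp
  | cons a l ih =>
      rw [List.map_cons, List.flatMap_cons, pv_join_cons, pv_join_append, ih]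

theorem pv_foldl_str (h : Int → String) (L : List Int) (init : String) :
    L.foldl (fun s j => s ++ h j) init = init ++ PySem.Str.join "" (L.map h) := by
  induction L generalizing init with
  | nil => rw [List.foldl_nil, List.map_nil, pv_join_nil, String.append_empty]
  | cons a l ih =>
      rw [List.foldl_cons, ih, List.map_cons, pv_join_cons, String.append_assoc]

-- render_group g is the join of B's per-digit pieces over enumerate g
theorem pv_render (g : List Char) :
    pvRenderGroup g =
      PySem.Str.join "" ((PySem.List.enumerate g).flatMap (pvFInner g)) := by
  unfold pvRenderGroup
  have hfun : (fun (out : String) (j : Int) =>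
      let d := (PySem.Int.ofChars? [PySem.List.pyGetD g j ' ']).getD 0
      if d ≠ 0 then
        let u := PySem.List.len g - 1 - j
        (if u = 0 ∧ j > 0 ∧ PySem.List.pyGetD g (j - 1) ' ' = '1' then
           out ++ PySem.List.pyGetD pvKNums 0 ""
         else out ++ PySem.List.pyGetD pvKNums (d - 1) "") ++
        PySem.List.pyGetD pvKUnits u ""
      else out)
      = fun out j => out ++ PySem.Str.join "" (pvFInner g (j, PySem.List.pyGetD g j ' ')) := by
    funext out j
    simp only [pvFInner]
    split_ifs with h1 h2
    · rw [List.cons_append, List.nil_append, pv_join_cons, pv_join_cons, pv_join_nil,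
        String.append_empty, String.append_assoc]
    · rw [List.cons_append, List.nil_append, pv_join_cons, pv_join_cons, pv_join_nil,
        String.append_empty, String.append_assoc]
    · rw [pv_join_nil, String.append_empty]
  rw [hfun, pv_foldl_str, String.empty_append,
    pv_join_flatMap, ← List.flatMap_map,
    ← PySem.List.enumerate_eq_map_pyRange g ' ']

-- ----- B's recursive grouping -----

def pvSplit (s : List Char) : List (List Char) :=
  if s.length ≤ 4 then [s]
  else s.take ((s.length - 1) % 4 + 1) :: pvSplit (s.drop ((s.length - 1) % 4 + 1))
termination_by s.length
decreasing_by
  simp only [List.length_drop]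
  omega

theorem pv_split_all4 : ∀ (n : Nat) (s : List Char), s.length = n → 0 < s.length →
    s.length % 4 = 0 → (∀ g ∈ pvSplit s, g.length = 4) ∧ (pvSplit s).length * 4 = s.length := by
  intro n
  induction n using Nat.strong_induction_on with
  | _ n ih =>
    intro s hn h0 h4
    by_cases hle : s.length ≤ 4
    · have hs4 : s.length = 4 := by omega
      rw [pvSplit.eq_def, if_pos hle]
      refine ⟨?_, by simp [hs4]⟩
      intro g hg
      simp only [List.mem_singleton] at hg
      subst hg
      exact hs4
    · have hh : (s.length - 1) % 4 + 1 = 4 := by omega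
      have hdl : (s.drop ((s.length - 1) % 4 + 1)).length = s.length - 4 := by
        rw [List.length_drop, hh]
      obtain ⟨hall, hlen⟩ := ih (s.length - 4) (by omega) _ hdl (by omega) (by omega)
      rw [pvSplit.eq_def, if_neg hle]
      constructor
      · intro g hg
        rcases List.mem_cons.mp hg with hg | hg
        · subst hg
          rw [List.length_take, hh]
          omega
        · exact hall g hg
      · rw [List.length_cons]
        rw [hdl] at hlen
        omega

theorem pv_split_wf : ∀ (n : Nat) (s : List Char), s.length = n → s ≠ [] →
    pvWFG (pvSplit s) ∧ (pvSplit s).flatten = s := by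
  intro n
  induction n using Nat.strong_induction_on with
  | _ n ih =>
    intro s hn hne
    have h0 : 0 < s.length := List.length_pos_of_ne_nil hne
    by_cases hle : s.length ≤ 4
    · rw [pvSplit.eq_def, if_pos hle]
      exact ⟨⟨h0, hle, by simp⟩, by simp⟩
    · set hh := (s.length - 1) % 4 + 1 with hhdef
      have hdl : (s.drop hh).length = s.length - hh := List.length_drop
      have hmod : (s.drop hh).length % 4 = 0 := by rw [hdl]; omega
      have hdpos : 0 < (s.drop hh).length := by rw [hdl]; omega
      have hdne : s.drop hh ≠ [] := List.ne_nil_of_length_pos hdpos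
      obtain ⟨hwfr, hflr⟩ := ih (s.drop hh).length (by rw [hdl]; omega) _ rfl hdne
      obtain ⟨hall, _⟩ := pv_split_all4 _ (s.drop hh) rfl hdpos hmod
      rw [pvSplit.eq_def, if_neg hle]
      refine ⟨⟨?_, ?_, hall⟩, ?_⟩
      · rw [List.length_take]; omega
      · rw [List.length_take]; omega
      · rw [List.flatten_cons, hflr, List.take_append_drop]

-- pvSplit never returns the empty list
theorem pv_split_ne_nil (s : List Char) : pvSplit s ≠ [] := by
  rw [pvSplit.eq_def]
  split <;> simp

-- go s renders exactly the canonical group rendering of pvSplit s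
theorem pv_go_eq : ∀ (n : Nat) (s : List Char), s.length = n →
    pvGo s = PySem.Str.join "" (pvBodyGroups (pvSplit s)) := by
  intro n
  induction n using Nat.strong_induction_on with
  | _ n ih =>
    intro s hn
    by_cases hle : s.length ≤ 4
    · have hil : PySem.List.len s ≤ 4 := by
        simp only [PySem.List.len_eq]
        exact_mod_cast hle
      rw [pvGo.eq_def, if_pos hil, pvSplit.eq_def, if_pos hle]
      simp only [pvBodyGroups, List.length_nil, List.append_nil, if_false, Nat.lt_irrefl]
      exact pv_render s
    · have hil : ¬ PySem.List.len s ≤ 4 := by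
        simp only [PySem.List.len_eq]
        exact_mod_cast hle
      set hh := (s.length - 1) % 4 + 1 with hhdef
      have hh1 : 1 ≤ hh := by omega
      have hh4 : hh ≤ 4 := by omega
      have hhle : hh ≤ s.length := by omega
      have hInt : PySem.Int.mod (PySem.List.len s - 1) 4 + 1 = ((hh : Nat) : Int) := by
        simp only [PySem.List.len_eq]
        have hc : ((s.length : Int) - 1) = (((s.length - 1 : Nat)) : Int) := by omega
        rw [hc, show (4 : Int) = ((4 : Nat) : Int) from rfl, PySem.Int.mod_natCast]
        push_cast [hhdef]
        ring
      have hdl : (s.drop hh).length = s.length - hh := List.length_drop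
      have hd0 : 0 < (s.drop hh).length := by omega
      have hd4 : (s.drop hh).length % 4 = 0 := by
        rw [hdl]
        omega
      obtain ⟨hall, hlen4⟩ := pv_split_all4 _ (s.drop hh) rfl hd0 hd4
      have hrlen : (pvSplit (s.drop hh)).length = (s.length - hh) / 4 := by
        rw [hdl] at hlen4
        omega
      have hrpos : 0 < (pvSplit (s.drop hh)).length :=
        List.length_pos_of_ne_nil (pv_split_ne_nil _)
      have hdiv : PySem.Int.floordiv (PySem.List.len s - ((hh : Nat) : Int)) 4
          = (((pvSplit (s.drop hh)).length : Nat) : Int) := by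
        simp only [PySem.List.len_eq]
        have hc : ((s.length : Int) - ((hh : Nat) : Int)) = (((s.length - hh : Nat)) : Int) := by
          omega
        rw [hc, show (4 : Int) = ((4 : Nat) : Int) from rfl, PySem.Int.floordiv_natCast, hrlen]
      rw [pvGo.eq_def, if_neg hil, pvSplit.eq_def, if_neg hle]
      simp only [hInt]
      rw [PySem.List.slice_to_natCast, PySem.List.slice_from_natCast, hdiv,
        ih (s.drop hh).length (by omega) (s.drop hh) rfl]
      simp only [pvBodyGroups]
      rw [pv_join_append, pv_join_append, if_pos hrpos, pv_join_cons, pv_join_nil,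
        String.append_empty, pv_render, String.append_assoc]

-- ===== VERDICT (by name: the statement is the Claim_ definition above) =====
theorem number_to_korean_amount_spec : Claim_equal_number_to_korean_amount := by
  intro number _ _
  unfold Spec_number_to_korean_amount
  have hA : number_to_korean_amount number =
      PySem.Str.join "" ((PySem.List.enumerate (PySem.Int.toChars number)).flatMap
          (pvFFlat (PySem.Int.toChars number)))
        ++ "원(금"
        ++ PySem.Str.join "" ((PySem.List.enumerate (PySem.Int.toChars number)).flatMap
          (pvFFlat (PySem.Int.toChars number)))
        ++ "정)" :=
    congrArg (fun r => PySem.Str.join "" r ++ "원(금" ++ PySem.Str.join "" r ++ "정)")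
      (pv_A_fold (PySem.Int.toChars number))
  have hB : number_to_korean_amount_alt number =
      pvGo (PySem.Int.toChars number) ++ "원(금" ++ pvGo (PySem.Int.toChars number) ++ "정)" := rfl
  obtain ⟨hwf, hfl⟩ := pv_split_wf _ (PySem.Int.toChars number) rfl (pv_toChars_ne_nil number)
  have hbody : (PySem.List.enumerate (PySem.Int.toChars number)).flatMap
      (pvFFlat (PySem.Int.toChars number)) = pvBodyGroups (pvSplit (PySem.Int.toChars number)) := by
    conv_lhs => rw [← hfl]
    exact pv_main _ hwf
  rw [hA, hB, hbody, ← pv_go_eq (PySem.Int.toChars number).length (PySem.Int.toChars number) rfl]
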